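-- pv_equiv track=rewrite | github.com/pypi-data/pypi-mirror-230 | packages/stowng/stowng-0.0.5.tar.gz/stowng-0.0.5/src/stowng/parser.py | set_verbosity
-- ===== SOURCE A (Python) =====
-- from typing import Dict, List, Optional, Tuple
--
-- def set_verbosity(verbosity_arg: List[str] or str):
--     """
--     Set the verbosity level.
--
--     :param verbosity_arg: The verbosity argument.
--     :return: The verbosity level.
--
--     :raises ValueError: If the verbosity argument is invalid.
--
--     :Example:
--     >>> set_verbosity(['1'])
--     1
--     >>> set_verbosity(['v'])
--     2
--     >>> set_verbosity(['vv', 'v'])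
--     5
--     >>> set_verbosity(['v', 'v', '1'])
--     5
--     >>> set_verbosity(['3', '1'])
--     4
--     >>> set_verbosity([])
--     0
--     >>> set_verbosity(['a'])
--     Traceback (most recent call last):
--         ...
--     ValueError: invalid verbosity level: a
--     """
--     verbosity = 0
--
--     if isinstance(verbosity_arg, list):
--         for arg in verbosity_arg:
--             if arg.isdigit():
--                 verbosity += int(arg)
--             else:
--                 verbosity += 1
--
--                 for c in arg:
--                     if c == "v":
--                         verbosity += 1
--                     else:
--                         raise ValueError(f"invalid verbosity level: {arg}")
--     else:
--         verbosity = int(verbosity_arg)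
--
--     return verbosity
-- ===== SOURCE B (Python) =====
-- def set_verbosity(verbosity_arg):
--     """Staged passes: validate all args first, then count by partition + join,
--     instead of mutating a counter inside nested loops."""
--     if not isinstance(verbosity_arg, list):
--         return int(verbosity_arg)
--
--     # pass 1: validate (raise on the first invalid arg, in order)
--     for arg in verbosity_arg:
--         if not arg.isdigit() and arg.strip("v"):
--             raise ValueError(f"invalid verbosity level: {arg}")
--
--     # pass 2: partition, then count
--     digits = [a for a in verbosity_arg if a.isdigit()]
--     vees = [a for a in verbosity_arg if not a.isdigit()]
--     return sum(int(d) for d in digits) + len(vees) + len("".join(vees))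
-- ===== Notes on version B (the rewrite author's own statement) =====
-- stated objective: alternative
-- what changed: Replaces A's single pass with a mutated counter and an inner per-character loop by staged passes: a validation pass (using strip('v') instead of a char loop), then a partition into digit and all-'v' args, counting the latter group via len and len(''.join(...)).
import Mathlib
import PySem

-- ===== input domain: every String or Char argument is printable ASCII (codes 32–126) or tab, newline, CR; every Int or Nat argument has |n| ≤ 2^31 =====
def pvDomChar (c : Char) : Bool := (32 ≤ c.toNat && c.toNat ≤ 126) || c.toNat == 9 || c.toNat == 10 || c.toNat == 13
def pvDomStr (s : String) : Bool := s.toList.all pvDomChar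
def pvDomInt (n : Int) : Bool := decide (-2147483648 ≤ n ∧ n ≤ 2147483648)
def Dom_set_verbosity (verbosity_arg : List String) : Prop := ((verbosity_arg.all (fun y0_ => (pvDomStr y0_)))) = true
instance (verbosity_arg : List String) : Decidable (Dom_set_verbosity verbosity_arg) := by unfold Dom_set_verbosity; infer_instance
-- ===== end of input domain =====

-- B restructures A into staged passes (validate, partition, count) instead of one pass
-- mutating a counter with an inner char loop; same cost, different decomposition.

-- ===== PORT A =====
-- inner 'for c in arg' loop: +1 per 'v', none = the raise at the first non-'v' char
def svInner (cs : List Char) (v : Int) : Option Int :=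
  match cs with
  | [] => some v
  | c :: rest => if c = 'v' then svInner rest (v + 1) else none

-- outer 'for arg in verbosity_arg' loop over the running counter; none = ValueError
def svLoop (args : List String) (v : Int) : Option Int :=
  match args with
  | [] => some v
  | a :: rest =>
    if PySem.Str.strIsdigit a then
      svLoop rest (v + (PySem.Int.ofStr? a).getD 0)   -- int(a) cannot fail: a.isdigit()
    else
      match svInner a.toList (v + 1) with
      | none => none
      | some v' => svLoop rest v'

def set_verbosity (verbosity_arg : List String) : Int :=
  (svLoop verbosity_arg 0).getD 0   -- .getD 0 only covers the raising inputs excluded by Pre_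

-- ===== PORT B =====
-- arg.strip("v"): drop 'v' from both ends
def svStripV (cs : List Char) : List Char :=
  ((cs.dropWhile (· = 'v')).reverse.dropWhile (· = 'v')).reverse

-- validation pass: arg valid iff isdigit or strip('v') is empty (falsy)
def svValid (a : String) : Bool :=
  PySem.Str.strIsdigit a || (svStripV a.toList).isEmpty

def set_verbosity_alt (verbosity_arg : List String) : Int :=
  if verbosity_arg.all svValid then
    let digits := verbosity_arg.filter (fun a => PySem.Str.strIsdigit a)
    let vees := verbosity_arg.filter (fun a => !(PySem.Str.strIsdigit a))
    (digits.map (fun d => (PySem.Int.ofStr? d).getD 0)).sum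
      + (vees.length : Int)
      + ((vees.map (fun w => w.toList.length)).sum : Int)   -- len("".join(vees))
  else 0   -- the validation pass raises; 0 only covers inputs excluded by Pre_

-- ===== PRECONDITION & SPEC =====
-- Pre_ excludes exactly the inputs on which A raises ValueError: an arg that is neither
-- a digit string nor all-'v' characters.
def Pre_set_verbosity (verbosity_arg : List String) : Prop :=
  ∀ a ∈ verbosity_arg, PySem.Str.strIsdigit a = true ∨ a.toList.all (· = 'v') = true
instance (verbosity_arg : List String) : Decidable (Pre_set_verbosity verbosity_arg) := by
  unfold Pre_set_verbosity; infer_instance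

def pvWitness_set_verbosity : List String := ["vv", "3", "v", "", "10"]

def Spec_set_verbosity (verbosity_arg : List String) (out : Int) : Prop := out = set_verbosity_alt verbosity_arg
instance (verbosity_arg : List String) (out : Int) : Decidable (Spec_set_verbosity verbosity_arg out) := by unfold Spec_set_verbosity; infer_instance

-- ===== CLAIM (what is proved, stated in full; the proofs are below) =====
def Claim_equal_set_verbosity : Prop := ∀ (verbosity_arg : List String), Dom_set_verbosity verbosity_arg → Pre_set_verbosity verbosity_arg → Spec_set_verbosity verbosity_arg (set_verbosity verbosity_arg)

-- ===== LEMMAS AND PROOFS =====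

theorem svStripV_nil_iff (cs : List Char) :
    (svStripV cs).isEmpty = true ↔ cs.all (· = 'v') = true := by
  unfold svStripV
  constructor
  · intro h
    simp only [List.isEmpty_iff, List.reverse_eq_nil_iff, List.dropWhile_eq_nil_iff,
      List.mem_reverse, decide_eq_true_eq] at h
    have h2 : ∀ x ∈ cs.dropWhile (· = 'v'), x = 'v' := h
    simp only [List.all_eq_true, decide_eq_true_eq]
    intro x hx
    rcases List.mem_append.1 ((List.takeWhile_append_dropWhile (p := (· = 'v')) (l := cs)) ▸ hx) with h1 | h1
    · exact of_decide_eq_true (List.mem_takeWhile_imp (p := fun x => decide (x = 'v')) h1)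
    · exact h2 x h1
  · intro h
    have : cs.dropWhile (· = 'v') = [] := by
      rw [List.dropWhile_eq_nil_iff]
      intro x hx
      simp only [List.all_eq_true] at h
      exact h x hx
    simp [this]

theorem svInner_all_v (cs : List Char) (h : cs.all (· = 'v') = true) (v : Int) :
    svInner cs v = some (v + cs.length) := by
  induction cs generalizing v with
  | nil => simp [svInner]
  | cons c rest ih =>
    simp only [List.all_cons, Bool.and_eq_true, decide_eq_true_eq] at h
    simp [svInner, h.1, ih h.2]
    ring

-- B's total as a function (the value of B's count stage)
def svTotal (args : List String) : Int :=
  ((args.filter (fun a => PySem.Str.strIsdigit a)).map (fun d => (PySem.Int.ofStr? d).getD 0)).sum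
    + ((args.filter (fun a => !(PySem.Str.strIsdigit a))).length : Int)
    + (((args.filter (fun a => !(PySem.Str.strIsdigit a))).map (fun w => w.toList.length)).sum : Int)

theorem svLoop_eq (args : List String) (h : Pre_set_verbosity args) (v : Int) :
    svLoop args v = some (v + svTotal args) := by
  induction args generalizing v with
  | nil => simp [svLoop, svTotal]
  | cons a rest ih =>
    have ha := h a (by simp)
    have hrest : Pre_set_verbosity rest := fun x hx => h x (by simp [hx])
    by_cases hd : PySem.Str.strIsdigit a = true
    · have hd' : PySem.Chars.strIsdigit a.toList = true := by
        simpa [PySem.Str.strIsdigit] using hd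
      simp only [svLoop, hd, if_true, ih hrest]
      simp [svTotal, hd']
      ring
    · have hd' : ¬ PySem.Chars.strIsdigit a.toList = true := by
        simpa [PySem.Str.strIsdigit] using hd
      have hv : a.toList.all (· = 'v') = true := ha.resolve_left hd
      have hi := svInner_all_v a.toList hv (v + 1)
      simp only [svLoop, hd, if_false, hi, ih hrest]
      simp [svTotal, hd']
      push_cast
      ring

theorem pre_valid (args : List String) (h : Pre_set_verbosity args) :
    args.all svValid = true := by
  simp only [List.all_eq_true]
  intro a ha
  rcases h a ha with h1 | h1
  · simp only [svValid, Bool.or_eq_true]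
    exact Or.inl (by simpa [PySem.Str.strIsdigit] using h1)
  · simp [svValid, (svStripV_nil_iff a.toList).2 h1]

-- ===== VERDICT (by name: the statement is the Claim_ definition above) =====
theorem set_verbosity_spec : Claim_equal_set_verbosity := by
  intro args _ hpre
  unfold Spec_set_verbosity set_verbosity set_verbosity_alt
  rw [pre_valid args hpre, if_pos rfl, svLoop_eq args hpre 0]
  simp [svTotal]
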